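-- pv_equiv track=rewrite | github.com/gabriellippiatt/University | COMP3506/Part B/security_db.py | hash_codes
-- ===== SOURCE A (Python) =====
-- def hash_codes(key: str):
--     """
--     Calculate the hashcode based on the key
--
--     :param key:
--     :return: hashcode integer
--     """
--     hashcode = 0
--     buffer = [None] * len(key)
--     counter = 0
--
--     for x in key :
--         buffer[counter] = ord(x)
--         hashcode += 1
--         counter += 1
--         for y in buffer :
--             if y != None :
--                 hashcode += y
--     return hashcode
-- ===== SOURCE B (Python) =====
-- def hash_codes(key: str):
--     """
--     Calculate the hashcode based on the key
--
--     :param key: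
--     :return: hashcode integer
--     """
--     hashcode = 0
--     prefix_sum = 0
--     for x in key:
--         prefix_sum += ord(x)
--         hashcode += 1 + prefix_sum
--     return hashcode
-- ===== Notes on version B (the rewrite author's own statement) =====
-- stated objective: faster
-- what changed: Replaced the quadratic re-scan of the growing buffer with a single pass that keeps a running prefix sum of character codes.
import Mathlib
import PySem

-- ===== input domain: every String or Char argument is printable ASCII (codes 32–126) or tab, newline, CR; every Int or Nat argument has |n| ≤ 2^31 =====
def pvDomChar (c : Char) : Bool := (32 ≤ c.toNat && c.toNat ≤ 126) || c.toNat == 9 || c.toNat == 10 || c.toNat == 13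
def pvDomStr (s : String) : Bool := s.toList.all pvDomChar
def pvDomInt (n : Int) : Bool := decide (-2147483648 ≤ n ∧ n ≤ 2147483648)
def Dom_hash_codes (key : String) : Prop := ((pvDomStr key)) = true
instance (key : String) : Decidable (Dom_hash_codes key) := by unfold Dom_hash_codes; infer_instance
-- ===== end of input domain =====

-- B replaces A's quadratic re-scan of the growing buffer with a single pass keeping a running prefix sum (asymptotically faster).


-- ===== PORT A =====
-- state: (hashcode, buffer, counter); buffer[counter] = ord(x); hashcode += 1;
-- then the inner loop over the whole buffer adds every non-None entry.
def pvInner (h : Int) (y : Option Int) : Int :=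
  match y with | some v => h + v | none => h

def pvStepA (st : Int × List (Option Int) × Nat) (x : Char) : Int × List (Option Int) × Nat :=
  let buf := st.2.1.set st.2.2 (some ((x.toNat : Int)))
  let h := st.1 + 1
  let h := buf.foldl pvInner h
  (h, buf, st.2.2 + 1)

def hash_codes (key : String) : Int :=
  (key.toList.foldl pvStepA (0, List.replicate key.toList.length none, 0)).1

-- ===== PORT B =====
-- state: (prefix_sum, hashcode)
def pvStepB (p : Int × Int) (x : Char) : Int × Int :=
  let s := p.1 + (x.toNat : Int)
  (s, p.2 + 1 + s)

def hash_codes_alt (key : String) : Int :=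
  (key.toList.foldl pvStepB (0, 0)).2

-- ===== PRECONDITION & SPEC =====
def Spec_hash_codes (key : String) (out : Int) : Prop := out = hash_codes_alt key
instance (key : String) (out : Int) : Decidable (Spec_hash_codes key out) := by unfold Spec_hash_codes; infer_instance

-- ===== CLAIM (what is proved, stated in full; the proofs are below) =====
def Claim_equal_hash_codes : Prop := ∀ (key : String), Dom_hash_codes key → Spec_hash_codes key (hash_codes key)

-- ===== LEMMAS AND PROOFS =====

-- summing the non-None entries of a fully/partially filled buffer
lemma pv_sumOpt (l : List Int) (k : Nat) (h : Int) :
    ((l.map some ++ List.replicate k none).foldl pvInner h) = h + l.sum := by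
  induction l generalizing h with
  | nil =>
    simp only [List.map_nil, List.nil_append, List.sum_nil, add_zero]
    induction k generalizing h with
    | zero => simp
    | succ n ih => simpa [List.replicate_succ, pvInner] using ih h
  | cons a t ih => simp [pvInner, ih]; ring

lemma pv_set_mid (l t : List (Option Int)) (v : Option Int) :
    (l ++ none :: t).set l.length v = l ++ v :: t := by
  induction l with
  | nil => simp
  | cons a l ih => simp [ih]

lemma pv_loop (rest pre : List Char) (h : Int) :
    (rest.foldl pvStepA
      (h, pre.map (fun c : Char => some ((c.toNat : Int))) ++ List.replicate rest.length none,
       pre.length)).1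
    = (rest.foldl pvStepB ((pre.map (fun c : Char => ((c.toNat : Int)))).sum, h)).2 := by
  induction rest generalizing pre h with
  | nil => simp
  | cons x r ih =>
    have hset :
        ((pre.map (fun c : Char => some ((c.toNat : Int))) ++ List.replicate (x :: r).length none).set
          pre.length (some ((x.toNat : Int))))
        = (pre ++ [x]).map (fun c : Char => some ((c.toNat : Int))) ++ List.replicate r.length none := by
      have : List.replicate (x :: r).length (none : Option Int)
          = none :: List.replicate r.length none := by simp [List.replicate_succ]
      rw [this]
      have := pv_set_mid (pre.map (fun c : Char => some ((c.toNat : Int))))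
        (List.replicate r.length none) (some ((x.toNat : Int)))
      simpa using this
    simp only [List.foldl_cons, pvStepA, pvStepB]
    rw [hset]
    have hm : (pre ++ [x]).map (fun c : Char => some ((c.toNat : Int)))
        = ((pre ++ [x]).map (fun c : Char => ((c.toNat : Int)))).map some := by
      simp
    rw [hm, pv_sumOpt ((pre ++ [x]).map fun c : Char => ((c.toNat : Int)))]
    have hlen : pre.length + 1 = (pre ++ [x]).length := by simp
    have := ih (pre ++ [x]) (h + 1 + ((pre ++ [x]).map fun c : Char => ((c.toNat : Int))).sum)
    simp only [hlen]
    rw [← hm, this]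
    congr 1
    simp

-- ===== VERDICT (by name: the statement is the Claim_ definition above) =====
theorem hash_codes_spec : Claim_equal_hash_codes := by
  intro key _
  unfold Spec_hash_codes hash_codes hash_codes_alt
  have := pv_loop key.toList [] 0
  simpa using this
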